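-- pv_equiv track=rewrite | github.com/sebastian-nunez/COP3530 | Python/Dropbox 2.py | solution
-- ===== SOURCE A (Python) =====
-- class Database:
--     def __init__(self):
--         self.db = dict()
--
--     def SET(self, key, field, value):
--         if not self.db.get(key):
--             self.db[key] = dict()
--
--         self.db[key][field] = value
--         return ""
--
--     def GET(self, key, field):
--         if not self.db.get(key) or not self.db.get(key).get(field):
--             return ""
--
--         return self.db.get(key).get(field)
--
--     def DELETE(self, key, field):
--         if not self.db.get(key) or not self.db.get(key).get(field):
--             return "false"
--
--         self.db.get(key).pop(field)
--         return "true"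
--
--     def SCAN(self, key, prefix):
--         output = []
--         if not self.db.get(key):
--             return ""
--
--         for field in self.db.get(key):
--             if prefix == "" or field.startswith(prefix):
--                 output.append(f"{field}({self.GET(key, field)})")
--
--         sorted(output)
--         return ", ".join(output)
--
-- def solution(queries):
--     db = Database()
--     output = []
--
--     for query in queries:
--         [operation, *params] = query
--
--         if operation == "SET":
--             [key, field, value] = params
--             output.append(db.SET(key, field, value))
--         elif operation == "GET":
--             [key, field] = params
--             output.append(db.GET(key, field))
--         elif operation == "DELETE":
--             [key, field] = params
--             output.append(db.DELETE(key, field))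
--         elif operation == "SCAN":
--             [key, prefix] = params
--             output.append(db.SCAN(key, prefix))
--         else:
--             output.append("")
--
--     return output
-- ===== SOURCE B (Python) =====
-- def solution(queries):
--     db = {}  # flat dict keyed by (key, field); insertion order does the bookkeeping
--     output = []
--     for query in queries:
--         operation, *params = query
--         if operation == "SET":
--             key, field, value = params
--             db[(key, field)] = value
--             output.append("")
--         elif operation == "GET":
--             key, field = params
--             v = db.get((key, field))
--             output.append(v if v else "")
--         elif operation == "DELETE":
--             key, field = params
--             if db.get((key, field)):
--                 del db[(key, field)]
--                 output.append("true")
--             else: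
--                 output.append("false")
--         elif operation == "SCAN":
--             key, prefix = params
--             output.append(", ".join(
--                 f"{f}({v if v else ''})"
--                 for (k, f), v in db.items()
--                 if k == key and f.startswith(prefix)))
--         else:
--             output.append("")
--     return output
-- ===== Notes on version B (the rewrite author's own statement) =====
-- stated objective: simpler
-- what changed: Replaces the Database class with its nested per-key sub-dicts by one flat dict keyed by (key, field) pairs: SET/GET/DELETE become single flat lookups and SCAN a single ordered filter of the flat dict, collapsing A's two-level truthiness guards into one.
-- outside the precondition, e.g. on solution([['SET', 'k']]): A raises ValueError, B raises ValueError
import Mathlib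
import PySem

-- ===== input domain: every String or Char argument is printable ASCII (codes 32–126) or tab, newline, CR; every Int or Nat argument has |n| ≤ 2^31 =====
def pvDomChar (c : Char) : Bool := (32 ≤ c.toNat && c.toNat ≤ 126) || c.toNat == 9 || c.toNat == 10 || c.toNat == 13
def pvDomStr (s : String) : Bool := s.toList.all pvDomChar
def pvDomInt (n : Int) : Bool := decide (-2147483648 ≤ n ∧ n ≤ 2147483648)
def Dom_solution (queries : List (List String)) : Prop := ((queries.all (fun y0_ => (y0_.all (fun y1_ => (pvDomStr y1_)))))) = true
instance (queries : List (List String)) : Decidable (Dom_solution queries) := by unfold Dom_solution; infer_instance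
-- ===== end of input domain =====

-- B replaces A's Database class with nested per-key dicts by one flat dict keyed by
-- (key, field) pairs (simpler: single lookups, SCAN is one ordered filter of the flat dict).

-- ===== PORT A =====
-- 'not self.db.get(key)' : None or an empty sub-dict is falsy
def dbTruthy (o : Option (PySem.Dict String String)) : Bool :=
  match o with
  | none => false
  | some s => s.size != 0

def dbSET (d : PySem.Dict String (PySem.Dict String String)) (key field value : String) :
    PySem.Dict String (PySem.Dict String String) × String :=
  let d1 := if !dbTruthy (d.get? key) then d.insert key PySem.Dict.empty else d
  -- self.db[key][field] = value : update the sub-dict in place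
  (d1.insert key (((d1.get? key).getD PySem.Dict.empty).insert field value), "")

def dbGET (d : PySem.Dict String (PySem.Dict String String)) (key field : String) : String :=
  if !dbTruthy (d.get? key) || ((d.get? key).getD PySem.Dict.empty).getD field "" == "" then ""
  else ((d.get? key).getD PySem.Dict.empty).getD field ""

def dbDELETE (d : PySem.Dict String (PySem.Dict String String)) (key field : String) :
    PySem.Dict String (PySem.Dict String String) × String :=
  if !dbTruthy (d.get? key) || ((d.get? key).getD PySem.Dict.empty).getD field "" == "" then
    (d, "false")
  else
    (d.insert key (((d.get? key).getD PySem.Dict.empty).erase field), "true")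

def dbSCAN (d : PySem.Dict String (PySem.Dict String String)) (key pre : String) : String :=
  if !dbTruthy (d.get? key) then ""
  else
    -- 'for field in self.db.get(key): if …: output.append(f"{field}({self.GET(key, field)})")'
    let output := ((d.get? key).getD PySem.Dict.empty).items.foldl
      (fun out p =>
        if pre == "" || PySem.Str.startswith p.1 pre then
          out ++ [PySem.Str.join "" [p.1, "(", dbGET d key p.1, ")"]]
        else out) []
    PySem.Str.join ", " output

def solnStep (st : PySem.Dict String (PySem.Dict String String) × List String)
    (query : List String) : PySem.Dict String (PySem.Dict String String) × List String :=
  match query with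
  | [] => st  -- Python raises ValueError here; excluded by Pre_
  | operation :: params =>
    if operation == "SET" then
      match params with
      | [key, field, value] =>
        let r := dbSET st.1 key field value
        (r.1, st.2 ++ [r.2])
      | _ => st  -- Python raises ValueError; excluded by Pre_
    else if operation == "GET" then
      match params with
      | [key, field] => (st.1, st.2 ++ [dbGET st.1 key field])
      | _ => st
    else if operation == "DELETE" then
      match params with
      | [key, field] =>
        let r := dbDELETE st.1 key field
        (r.1, st.2 ++ [r.2])
      | _ => st
    else if operation == "SCAN" then
      match params with
      | [key, pre] => (st.1, st.2 ++ [dbSCAN st.1 key pre])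
      | _ => st
    else (st.1, st.2 ++ [""])

def solution (queries : List (List String)) : List String :=
  (queries.foldl solnStep (PySem.Dict.empty, [])).2

-- ===== PORT B =====
def altStep (st : PySem.Dict (String × String) String × List String)
    (query : List String) : PySem.Dict (String × String) String × List String :=
  match query with
  | [] => st  -- Python raises ValueError here; excluded by Pre_
  | operation :: params =>
    if operation == "SET" then
      match params with
      | [key, field, value] => (st.1.insert (key, field) value, st.2 ++ [""])
      | _ => st
    else if operation == "GET" then
      match params with
      | [key, field] =>
        let v := st.1.get? (key, field)
        (st.1, st.2 ++ [match v with | none => "" | some w => if w == "" then "" else w])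
      | _ => st
    else if operation == "DELETE" then
      match params with
      | [key, field] =>
        if (match st.1.get? (key, field) with | none => false | some w => w != "") then
          (st.1.erase (key, field), st.2 ++ ["true"])
        else (st.1, st.2 ++ ["false"])
      | _ => st
    else if operation == "SCAN" then
      match params with
      | [key, pre] =>
        (st.1, st.2 ++ [PySem.Str.join ", "
          (((st.1.items.filter (fun p => p.1.1 == key && PySem.Str.startswith p.1.2 pre)).map
            (fun p => PySem.Str.join "" [p.1.2, "(", (if p.2 == "" then "" else p.2), ")"])))])
      | _ => st
    else (st.1, st.2 ++ [""])

def solution_alt (queries : List (List String)) : List String :=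
  (queries.foldl altStep (PySem.Dict.empty, [])).2

-- ===== PRECONDITION & SPEC =====
-- Pre_ excludes exactly the queries on which Python A raises ValueError while
-- destructuring: an empty query, or a wrong number of parameters for SET (3) /
-- GET / DELETE / SCAN (2). Unknown operations of any arity are admitted.
def okQuery (q : List String) : Bool :=
  match q with
  | [] => false
  | op :: params =>
    if op == "SET" then params.length == 3
    else if op == "GET" || op == "DELETE" || op == "SCAN" then params.length == 2
    else true

def Pre_solution (queries : List (List String)) : Prop := queries.all okQuery = true
instance (queries : List (List String)) : Decidable (Pre_solution queries) := by
  unfold Pre_solution; infer_instance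

def pvWitness_solution : List (List String) :=
  [["SET", "a", "f", "v"], ["SET", "a", "g", ""], ["GET", "a", "f"], ["SCAN", "a", ""],
   ["DELETE", "a", "f"], ["SCAN", "a", "f"], ["HELP"]]

def Spec_solution (queries : List (List String)) (out : List String) : Prop := out = solution_alt queries
instance (queries : List (List String)) (out : List String) : Decidable (Spec_solution queries out) := by unfold Spec_solution; infer_instance

-- ===== CLAIM (what is proved, stated in full; the proofs are below) =====
def Claim_equal_solution : Prop := ∀ (queries : List (List String)), Dom_solution queries → Pre_solution queries → Spec_solution queries (solution queries)

-- ===== LEMMAS AND PROOFS =====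

-- The relation between A's nested database and B's flat database: the flat keys are
-- unique, and for every key the sub-dict's items are, in order, the flat items
-- whose first key component is that key.
def DbInv (d : PySem.Dict String (PySem.Dict String String))
    (flat : PySem.Dict (String × String) String) : Prop :=
  flat.keys.Nodup ∧
  ∀ k : String, ((d.get? k).getD PySem.Dict.empty).items
    = (flat.items.filter (fun p => p.1.1 == k)).map (fun p => (p.1.2, p.2))

theorem find?_flat (l : List ((String × String) × String)) (key field : String) :
    List.find? (fun p => p.1 == field)
      ((l.filter (fun p => p.1.1 == key)).map (fun p => (p.1.2, p.2)))
    = Option.map (fun p => (p.1.2, p.2)) (List.find? (fun p => p.1 == (key, field)) l) := by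
  induction l with
  | nil => simp
  | cons q t ih =>
    rw [List.filter_cons, List.find?_cons]
    by_cases h1 : q.1.1 = key
    · by_cases h2 : q.1.2 = field
      · have hb : (q.1 == (key, field)) = true := by
          simp [Prod.ext_iff, h1, h2]
        simp [h1, h2, hb]
      · have hb : (q.1 == (key, field)) = false := by
          simp [Prod.ext_iff, h2]
        simp [h1, h2, hb, ih]
    · have hb : (q.1 == (key, field)) = false := by
        simp [Prod.ext_iff, h1]
      simp [h1, hb, ih]

theorem get?_corr (d : PySem.Dict String (PySem.Dict String String))
    (flat : PySem.Dict (String × String) String) (h : DbInv d flat) (key field : String) :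
    ((d.get? key).getD PySem.Dict.empty).get? field = flat.get? (key, field) := by
  obtain ⟨-, hit⟩ := h
  show Option.map (fun x => x.2)
      (List.find? (fun p => p.1 == field) ((d.get? key).getD PySem.Dict.empty).items) = _
  rw [hit key, find?_flat, Option.map_map]
  rfl

theorem items_nil_of_not_truthy (d : PySem.Dict String (PySem.Dict String String)) (key : String)
    (h : ¬ dbTruthy (d.get? key) = true) :
    ((d.get? key).getD PySem.Dict.empty).items = [] := by
  cases hd : d.get? key with
  | none => simp [PySem.Dict.empty]
  | some s =>
    rw [hd] at h
    simp only [dbTruthy, bne_iff_ne, ne_eq, Decidable.not_not] at h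
    simpa [PySem.Dict.size, List.length_eq_zero_iff] using h

theorem truthy_of_get?_some (d : PySem.Dict String (PySem.Dict String String))
    (key field w : String)
    (h : ((d.get? key).getD PySem.Dict.empty).get? field = some w) :
    dbTruthy (d.get? key) = true := by
  by_contra hc
  rw [show ((d.get? key).getD PySem.Dict.empty).get? field
      = Option.map (fun x => x.2) (List.find? (fun p => p.1 == field)
        ((d.get? key).getD PySem.Dict.empty).items) from rfl,
    items_nil_of_not_truthy d key hc] at h
  simp at h

theorem GET_corr (d : PySem.Dict String (PySem.Dict String String))
    (flat : PySem.Dict (String × String) String) (h : DbInv d flat) (key field : String) :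
    dbGET d key field
      = (match flat.get? (key, field) with | none => "" | some w => if w == "" then "" else w) := by
  have hg := get?_corr d flat h key field
  cases hf : flat.get? (key, field) with
  | none =>
    rw [hf] at hg
    have hd0 : ((d.get? key).getD PySem.Dict.empty).getD field "" = "" := by
      rw [PySem.Dict.getD_eq_get?_getD, hg]; rfl
    simp [dbGET, hd0]
  | some w =>
    rw [hf] at hg
    have ht := truthy_of_get?_some d key field w hg
    have hd0 : ((d.get? key).getD PySem.Dict.empty).getD field "" = w := by
      rw [PySem.Dict.getD_eq_get?_getD, hg]; rfl
    by_cases hw : w = ""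
    · simp [dbGET, hd0, ht, hw]
    · simp [dbGET, hd0, ht, hw]

theorem nodup_keys_erase (flat : PySem.Dict (String × String) String) (k : String × String)
    (h : flat.keys.Nodup) : (flat.erase k).keys.Nodup := by
  unfold PySem.Dict.erase PySem.Dict.keys at *
  exact List.Nodup.sublist (List.Sublist.map _ List.filter_sublist) h

theorem items_erase_eq (flat : PySem.Dict (String × String) String) (k : String × String) :
    (flat.erase k).items = flat.items.filter (fun p => !(p.1 == k)) := rfl

theorem SET_corr (d : PySem.Dict String (PySem.Dict String String))
    (flat : PySem.Dict (String × String) String) (h : DbInv d flat) (key field value : String) :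
    DbInv (dbSET d key field value).1 (flat.insert (key, field) value) := by
  obtain ⟨hnd, hit⟩ := h
  refine ⟨PySem.Dict.nodup_keys_insert _ _ _ hnd, ?_⟩
  intro k
  by_cases htr : dbTruthy (d.get? key) = true
  · -- d1 = d
    have hcc : ((d.get? key).getD PySem.Dict.empty).contains field = flat.contains (key, field) := by
      rw [PySem.Dict.contains_eq_isSome_get?, PySem.Dict.contains_eq_isSome_get?,
        get?_corr d flat ⟨hnd, hit⟩ key field]
    by_cases hk : k = key
    · subst hk
      simp only [dbSET, htr, Bool.not_true, Bool.false_eq_true, if_false,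
        PySem.Dict.get?_insert_self, Option.getD_some]
      by_cases hcf : flat.contains (k, field) = true
      · rw [PySem.Dict.items_insert_of_contains _ _ (hcc.trans hcf),
          PySem.Dict.items_insert_of_contains _ _ hcf, hit k,
          List.filter_map, List.map_map, List.map_map]
        have hfc : List.filter ((fun p => p.1.1 == k) ∘
              (fun p => if (p.1 == (k, field)) = true then ((k, field), value) else p)) flat.items
            = List.filter (fun p => p.1.1 == k) flat.items := by
          refine List.filter_congr ?_
          intro x _
          by_cases hx : x.1 = (k, field) <;> simp [Function.comp, hx]
        rw [hfc]
        refine List.map_congr_left ?_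
        intro x hx
        have hx1 : x.1.1 = k := by simpa using (List.mem_filter.mp hx).2
        by_cases h2 : x.1.2 = field <;>
          simp [Function.comp, hx1, h2, Prod.ext_iff]
      · have hcf' : flat.contains (k, field) = false := by
          revert hcf; cases flat.contains (k, field) <;> simp
        have hcs : ((d.get? k).getD PySem.Dict.empty).contains field = false := hcc.trans hcf'
        rw [PySem.Dict.items_insert_of_not_contains _ _ hcs,
          PySem.Dict.items_insert_of_not_contains _ _ hcf', hit k]
        simp [List.filter_append]
    · -- k ≠ key
      simp only [dbSET, htr, Bool.not_true, Bool.false_eq_true, if_false]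
      rw [PySem.Dict.get?_insert_of_ne _ _ hk]
      by_cases hcf : flat.contains (key, field) = true
      · rw [PySem.Dict.items_insert_of_contains _ _ hcf, List.filter_map,
          List.filter_congr (q := fun p => p.1.1 == k) ?_, List.map_map]
        · rw [hit k]
          refine List.map_congr_left ?_
          intro x hx
          have hx1 : x.1.1 = k := by simpa using (List.mem_filter.mp hx).2
          have hxne : x.1 ≠ (key, field) := by
            intro hc; apply hk; rw [← hx1, hc]
          simp [Function.comp, hxne]
        · intro x _
          by_cases hx : x.1 = (key, field) <;>
            simp [Function.comp, hx]
      · have hcf' : flat.contains (key, field) = false := by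
          revert hcf; cases flat.contains (key, field) <;> simp
        rw [PySem.Dict.items_insert_of_not_contains _ _ hcf', List.filter_append, hit k]
        simp [Ne.symm hk]
  · -- not truthy: d1 = d.insert key empty, old sub empty
    have hnil := items_nil_of_not_truthy d key htr
    have hfnil : flat.items.filter (fun p => p.1.1 == key) = [] := by
      have := hit key
      rw [hnil] at this
      exact (List.map_eq_nil_iff.mp this.symm)
    have hgf : flat.get? (key, field) = none := by
      rw [← get?_corr d flat ⟨hnd, hit⟩ key field]
      show Option.map (fun x => x.2)
        (List.find? (fun p => p.1 == field) ((d.get? key).getD PySem.Dict.empty).items) = none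
      rw [hnil]; rfl
    have hcf' : flat.contains (key, field) = false := by
      rw [PySem.Dict.contains_eq_isSome_get?, hgf]; rfl
    have htr' : dbTruthy (d.get? key) = false := by
      revert htr; cases dbTruthy (d.get? key) <;> simp
    by_cases hk : k = key
    · subst hk
      have hd1 : (if (!dbTruthy (d.get? k)) = true then d.insert k PySem.Dict.empty else d)
          = d.insert k PySem.Dict.empty := by rw [htr']; rfl
      simp only [dbSET]
      rw [hd1, PySem.Dict.get?_insert_self, Option.getD_some,
        PySem.Dict.get?_insert_self, Option.getD_some,
        PySem.Dict.items_insert_of_not_contains _ _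
          (show (PySem.Dict.empty : PySem.Dict String String).contains field = false from rfl),
        PySem.Dict.items_insert_of_not_contains _ _ hcf',
        List.filter_append, hfnil]
      simp [PySem.Dict.empty]
    · have hd1 : (if (!dbTruthy (d.get? key)) = true then d.insert key PySem.Dict.empty else d)
          = d.insert key PySem.Dict.empty := by rw [htr']; rfl
      simp only [dbSET]
      rw [hd1, PySem.Dict.get?_insert_of_ne _ _ hk, PySem.Dict.get?_insert_of_ne _ _ hk,
        PySem.Dict.items_insert_of_not_contains _ _ hcf', List.filter_append, hit k]
      simp [Ne.symm hk]

theorem DELETE_corr (d : PySem.Dict String (PySem.Dict String String))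
    (flat : PySem.Dict (String × String) String) (h : DbInv d flat) (key field : String) :
    DbInv (d.insert key (((d.get? key).getD PySem.Dict.empty).erase field))
      (flat.erase (key, field)) := by
  obtain ⟨hnd, hit⟩ := h
  refine ⟨nodup_keys_erase flat _ hnd, ?_⟩
  intro k
  rw [items_erase_eq]
  by_cases hk : k = key
  · subst hk
    rw [PySem.Dict.get?_insert_self, Option.getD_some,
      show (((d.get? k).getD PySem.Dict.empty).erase field).items
        = ((d.get? k).getD PySem.Dict.empty).items.filter (fun p => !(p.1 == field)) from rfl,
      hit k, List.filter_map, List.filter_filter, List.filter_filter]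
    refine congrArg _ (List.filter_congr ?_)
    intro x _
    by_cases h1 : x.1.1 = k
    · by_cases h2 : x.1.2 = field
      · have e1 : (x.1.1 == k) = true := by simp [h1]
        have e2 : (x.1.2 == field) = true := by simp [h2]
        have e3 : (x.1 == (k, field)) = true := by simp [Prod.ext_iff, h1, h2]
        simp [Function.comp, e1, e2, e3]
      · have e1 : (x.1.1 == k) = true := by simp [h1]
        have e2 : (x.1.2 == field) = false := by simp [h2]
        have e3 : (x.1 == (k, field)) = false := by simp [Prod.ext_iff, h2]
        simp [Function.comp, e1, e2, e3]
    · have e1 : (x.1.1 == k) = false := by simp [h1]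
      simp [Function.comp, e1]
  · rw [PySem.Dict.get?_insert_of_ne _ _ hk, hit k, List.filter_filter]
    refine congrArg _ (List.filter_congr ?_).symm
    intro x _
    by_cases h1 : x.1.1 = k
    · have hne : x.1 ≠ (key, field) := by intro hc; apply hk; rw [← h1, hc]
      have e1 : (x.1.1 == k) = true := by simp [h1]
      have e3 : (x.1 == (key, field)) = false := by simp [hne]
      simp [e1, e3]
    · have e1 : (x.1.1 == k) = false := by simp [h1]
      simp [e1]

theorem SCAN_corr (d : PySem.Dict String (PySem.Dict String String))
    (flat : PySem.Dict (String × String) String) (h : DbInv d flat) (key pre : String) :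
    dbSCAN d key pre
      = PySem.Str.join ", "
          ((flat.items.filter (fun p => p.1.1 == key && PySem.Str.startswith p.1.2 pre)).map
            (fun p => PySem.Str.join "" [p.1.2, "(", (if p.2 == "" then "" else p.2), ")"])) := by
  obtain ⟨hnd, hit⟩ := h
  by_cases htr : dbTruthy (d.get? key) = true
  · simp only [dbSCAN, htr, Bool.not_true, Bool.false_eq_true, if_false,
      PySem.List.foldl_append_if, List.nil_append]
    refine congrArg _ ?_
    rw [hit key, List.filter_map, List.map_map, List.filter_filter]
    rw [List.filter_congr
      (q := fun p => p.1.1 == key && PySem.Str.startswith p.1.2 pre) ?_]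
    · refine List.map_congr_left ?_
      intro x hx
      have hmem := List.mem_filter.mp hx
      have hx1 : x.1.1 = key := by
        have := hmem.2
        simp only [Bool.and_eq_true, beq_iff_eq] at this
        exact this.1
      have hgx : flat.get? x.1 = some x.2 := by
        have hmi : (x.1, x.2) ∈ flat.items := by simpa using hmem.1
        exact PySem.Dict.get?_of_mem_items _ hmi hnd
      have hgk : flat.get? (key, x.1.2) = some x.2 := by
        rw [show (key, x.1.2) = x.1 by rw [← hx1]]
        exact hgx
      have hgc := GET_corr d flat ⟨hnd, hit⟩ key x.1.2
      rw [hgk] at hgc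
      simp only [Function.comp]
      rw [hgc]
    · intro x _
      by_cases h1 : x.1.1 = key
      · by_cases hp : pre = ""
        · subst hp
          simp [Function.comp, h1, PySem.Str.startswith, PySem.Chars.startswith]
        · simp [Function.comp, h1, hp]
      · have e1 : (x.1.1 == key) = false := by simp [h1]
        simp [Function.comp, e1]
  · have hnil := items_nil_of_not_truthy d key htr
    have hfnil : flat.items.filter (fun p => p.1.1 == key) = [] := by
      have := hit key
      rw [hnil] at this
      exact (List.map_eq_nil_iff.mp this.symm)
    have hnil2 : flat.items.filter
        (fun p => p.1.1 == key && PySem.Str.startswith p.1.2 pre) = [] := by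
      rw [List.filter_eq_nil_iff] at hfnil ⊢
      intro a ha
      have := hfnil a ha
      simp only [Bool.and_eq_true, not_and]
      intro hc
      exact absurd hc this
    rw [hnil2]
    simp [dbSCAN, htr]
    rfl

theorem step_corr (d : PySem.Dict String (PySem.Dict String String))
    (flat : PySem.Dict (String × String) String) (out : List String) (q : List String)
    (h : DbInv d flat) (hq : okQuery q = true) :
    DbInv (solnStep (d, out) q).1 (altStep (flat, out) q).1 ∧
      (solnStep (d, out) q).2 = (altStep (flat, out) q).2 := by
  cases q with
  | nil => simp [okQuery] at hq
  | cons op params =>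
    by_cases hset : op = "SET"
    · subst hset
      rcases params with _ | ⟨key, _ | ⟨field, _ | ⟨value, _ | _⟩⟩⟩ <;> simp [okQuery] at hq
      have hA : solnStep (d, out) ("SET" :: [key, field, value])
          = ((dbSET d key field value).1, out ++ [(dbSET d key field value).2]) := rfl
      have hB : altStep (flat, out) ("SET" :: [key, field, value])
          = (flat.insert (key, field) value, out ++ [""]) := rfl
      rw [hA, hB]
      exact ⟨SET_corr d flat h key field value, rfl⟩
    · by_cases hget : op = "GET"
      · subst hget
        rcases params with _ | ⟨key, _ | ⟨field, _ | _⟩⟩ <;> simp [okQuery] at hq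
        have hA : solnStep (d, out) ("GET" :: [key, field])
            = (d, out ++ [dbGET d key field]) := rfl
        have hB : altStep (flat, out) ("GET" :: [key, field])
            = (flat, out ++ [match flat.get? (key, field) with
                | none => "" | some w => if w == "" then "" else w]) := rfl
        rw [hA, hB]
        exact ⟨h, by rw [GET_corr d flat h key field]⟩
      · by_cases hdel : op = "DELETE"
        · subst hdel
          rcases params with _ | ⟨key, _ | ⟨field, _ | _⟩⟩ <;> simp [okQuery] at hq
          have hg := get?_corr d flat h key field
          have hA : solnStep (d, out) ("DELETE" :: [key, field])
              = ((dbDELETE d key field).1, out ++ [(dbDELETE d key field).2]) := rfl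
          have hB : altStep (flat, out) ("DELETE" :: [key, field])
              = (if (match flat.get? (key, field) with
                    | none => false | some w => w != "") = true then
                  (flat.erase (key, field), out ++ ["true"])
                else (flat, out ++ ["false"])) := rfl
          rw [hA, hB]
          cases hf : flat.get? (key, field) with
          | none =>
            have hd0 : ((d.get? key).getD PySem.Dict.empty).getD field "" = "" := by
              rw [PySem.Dict.getD_eq_get?_getD, hg, hf]; rfl
            have hAd : dbDELETE d key field = (d, "false") := by simp [dbDELETE, hd0]
            rw [hAd]
            exact ⟨h, rfl⟩
          | some w =>
            by_cases hw : w = ""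
            · subst hw
              have hd0 : ((d.get? key).getD PySem.Dict.empty).getD field "" = "" := by
                rw [PySem.Dict.getD_eq_get?_getD, hg, hf]; rfl
              have hAd : dbDELETE d key field = (d, "false") := by simp [dbDELETE, hd0]
              rw [hAd]
              exact ⟨h, rfl⟩
            · have hd0 : ((d.get? key).getD PySem.Dict.empty).getD field "" = w := by
                rw [PySem.Dict.getD_eq_get?_getD, hg, hf]; rfl
              have ht : dbTruthy (d.get? key) = true :=
                truthy_of_get?_some d key field w (by rw [hg, hf])
              have hg2 : (w != "") = true := by simp [hw]
              have hAd : dbDELETE d key field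
                  = (d.insert key (((d.get? key).getD PySem.Dict.empty).erase field), "true") := by
                simp [dbDELETE, hd0, ht, hw]
              have hcond : (match (some w : Option String) with
                  | none => false | some w' => w' != "") = true := hg2
              rw [if_pos hcond, hAd]
              exact ⟨DELETE_corr d flat h key field, rfl⟩
        · by_cases hscan : op = "SCAN"
          · subst hscan
            rcases params with _ | ⟨key, _ | ⟨pre, _ | _⟩⟩ <;> simp [okQuery] at hq
            have hA : solnStep (d, out) ("SCAN" :: [key, pre])
                = (d, out ++ [dbSCAN d key pre]) := rfl
            have hB : altStep (flat, out) ("SCAN" :: [key, pre])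
                = (flat, out ++ [PySem.Str.join ", "
                    (((flat.items.filter
                        (fun p => p.1.1 == key && PySem.Str.startswith p.1.2 pre)).map
                      (fun p => PySem.Str.join "" [p.1.2, "(", (if p.2 == "" then "" else p.2), ")"])))]) := rfl
            rw [hA, hB]
            exact ⟨h, by rw [SCAN_corr d flat h key pre]⟩
          · have e1 : (op == "SET") = false := by simp [hset]
            have e2 : (op == "GET") = false := by simp [hget]
            have e3 : (op == "DELETE") = false := by simp [hdel]
            have e4 : (op == "SCAN") = false := by simp [hscan]
            have hA : solnStep (d, out) (op :: params) = (d, out ++ [""]) := by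
              simp [solnStep, e1, e2, e3, e4]
            have hB : altStep (flat, out) (op :: params) = (flat, out ++ [""]) := by
              simp [altStep, e1, e2, e3, e4]
            rw [hA, hB]
            exact ⟨h, rfl⟩

theorem loop_corr (qs : List (List String)) (d : PySem.Dict String (PySem.Dict String String))
    (flat : PySem.Dict (String × String) String) (out : List String)
    (h : DbInv d flat) (hq : qs.all okQuery = true) :
    (qs.foldl solnStep (d, out)).2 = (qs.foldl altStep (flat, out)).2 := by
  induction qs generalizing d flat out with
  | nil => rfl
  | cons q t ih =>
    simp only [List.all_cons, Bool.and_eq_true] at hq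
    obtain ⟨h1, h2⟩ := step_corr d flat out q h hq.1
    simp only [List.foldl_cons]
    have e1 : solnStep (d, out) q = ((solnStep (d, out) q).1, (solnStep (d, out) q).2) := rfl
    have e2 : altStep (flat, out) q = ((altStep (flat, out) q).1, (altStep (flat, out) q).2) := rfl
    rw [e1, e2, h2]
    exact ih _ _ _ h1 hq.2

-- ===== VERDICT (by name: the statement is the Claim_ definition above) =====
theorem solution_spec : Claim_equal_solution := by
  intro queries _ hpre
  unfold Spec_solution solution solution_alt
  refine loop_corr queries _ _ [] ⟨by simp [PySem.Dict.keys_empty], ?_⟩ hpre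
  intro k
  simp [PySem.Dict.get?, PySem.Dict.empty]
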